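-- pv_equiv track=rewrite | github.com/jKaleba/WDI | Z6/Z6.py | subsetsR
-- ===== SOURCE A (Python) =====
-- def subsetsR(divisors: list, index=0, product=1, n=3) -> int:
--     if index == len(divisors):
--         if product == 1:
--             return 0
--         else:
--             return product
--
--     return subsetsR(divisors, index + 1, product, n - 1) + subsetsR(divisors, index + 1, product * divisors[index],
--                                                                     n - 1)
-- ===== SOURCE B (Python) =====
-- def subsetsR(divisors: list, index=0, product=1, n=3) -> int:
--     # Closed form: the recursion sums product * prod(chosen) over all subsets of
--     # divisors[index:], except subsets whose total product equals 1 contribute 0.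
--     # Sum over all subsets = product * prod(1 + d); subtract the count of subsets
--     # whose running product is exactly 1 (only +/-1 entries can make that).
--     items = [divisors[i] for i in range(index, len(divisors))]
--     total = product
--     for d in items:
--         total *= 1 + d
--     ones = items.count(1)
--     mones = items.count(-1)
--     if product == 1:
--         bad = 2 ** ones * (1 if mones == 0 else 2 ** (mones - 1))
--     elif product == -1:
--         bad = 2 ** ones * (0 if mones == 0 else 2 ** (mones - 1))
--     else:
--         bad = 0
--     return total - bad
-- ===== Notes on version B (the rewrite author's own statement) =====
-- stated objective: alternative
-- what changed: Replaced the subset recursion by a single pass over divisors[index:]: total = product * prod(1+d) minus the count of subsets whose product is exactly 1, computed from the counts of 1 and -1 entries.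
-- outside the precondition, e.g. on subsetsR([1, 2], 3, 1, 3): A raises RecursionError, B returns 0; on subsetsR([1, 2], -3, 1, 3): A raises IndexError, B raises IndexError
import Mathlib
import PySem

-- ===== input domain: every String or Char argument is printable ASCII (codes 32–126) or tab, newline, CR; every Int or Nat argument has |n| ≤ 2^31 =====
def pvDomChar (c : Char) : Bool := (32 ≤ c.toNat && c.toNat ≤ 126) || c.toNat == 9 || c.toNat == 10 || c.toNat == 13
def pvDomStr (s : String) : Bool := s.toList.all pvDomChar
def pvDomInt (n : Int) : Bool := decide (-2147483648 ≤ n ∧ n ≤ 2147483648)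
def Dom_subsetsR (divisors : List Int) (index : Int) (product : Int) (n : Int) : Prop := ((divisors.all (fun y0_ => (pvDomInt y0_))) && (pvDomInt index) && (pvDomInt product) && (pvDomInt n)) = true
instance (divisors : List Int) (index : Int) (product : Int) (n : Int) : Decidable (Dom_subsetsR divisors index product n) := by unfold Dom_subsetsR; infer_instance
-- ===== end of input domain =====

-- B replaces A's subset recursion by a single-pass closed form: the sum over
-- all subsets as a product, minus the count of subsets whose product is 1.

-- ===== PORT A =====
-- Literal port of A's recursion. The stop test 'index == len(divisors)' is
-- totalized to 'len(divisors) <= index' (equal whenever index <= len, which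
-- Pre_ guarantees; Python recurses forever for index > len).
def subsetsR (divisors : List Int) (index : Int) (product : Int) (n : Int) : Int :=
  if (divisors.length : Int) ≤ index then
    if product = 1 then 0 else product
  else
    subsetsR divisors (index + 1) product (n - 1) +
      subsetsR divisors (index + 1) (product * PySem.List.pyGetD divisors index 0) (n - 1)
termination_by ((divisors.length : Int) - index).toNat
decreasing_by all_goals (simp at *; omega)

-- ===== PORT B =====
-- Literal port of Source B: items = divisors[index:len], total = fold of *(1+d),
-- bad = number of subsets multiplying to exactly 1, from counts of 1 and -1.
def subsetsR_alt (divisors : List Int) (index : Int) (product : Int) (n : Int) : Int :=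
  let items := (PySem.List.pyRange index (divisors.length : Int) 1).map
      (fun i => PySem.List.pyGetD divisors i 0)
  let total := items.foldl (fun acc d => acc * (1 + d)) product
  let ones := items.count 1
  let mones := items.count (-1)
  let bad : Int :=
    if product = 1 then (2 : Int) ^ ones * (if mones = 0 then 1 else (2 : Int) ^ (mones - 1))
    else if product = -1 then (2 : Int) ^ ones * (if mones = 0 then 0 else (2 : Int) ^ (mones - 1))
    else 0
  total - bad

-- ===== PRECONDITION & SPEC =====
-- Pre_ excludes index < -len(divisors), where Python A raises IndexError, and
-- index > len(divisors), where Python A recurses forever (RecursionError).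
def Pre_subsetsR (divisors : List Int) (index : Int) (product : Int) (n : Int) : Prop :=
  -(divisors.length : Int) ≤ index ∧ index ≤ (divisors.length : Int)
instance (divisors : List Int) (index : Int) (product : Int) (n : Int) : Decidable (Pre_subsetsR divisors index product n) := by unfold Pre_subsetsR; infer_instance
def pvWitness_subsetsR : List Int × Int × Int × Int := ([2, 3], 0, 1, 3)

def Spec_subsetsR (divisors : List Int) (index : Int) (product : Int) (n : Int) (out : Int) : Prop := out = subsetsR_alt divisors index product n
instance (divisors : List Int) (index : Int) (product : Int) (n : Int) (out : Int) : Decidable (Spec_subsetsR divisors index product n out) := by unfold Spec_subsetsR; infer_instance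

-- ===== CLAIM (what is proved, stated in full; the proofs are below) =====
def Claim_equal_subsetsR : Prop := ∀ (divisors : List Int) (index : Int) (product : Int) (n : Int), Dom_subsetsR divisors index product n → Pre_subsetsR divisors index product n → Spec_subsetsR divisors index product n (subsetsR divisors index product n)

-- ===== LEMMAS AND PROOFS =====

-- Abstract form of A's recursion over the list of remaining items.
def gSub : List Int → Int → Int
  | [], p => if p = 1 then 0 else p
  | d :: L, p => gSub L p + gSub L (p * d)

-- The 'bad' count of B's port, as a function of the item list.
def badSub (L : List Int) (p : Int) : Int :=
  if p = 1 then (2 : Int) ^ (L.count 1) * (if L.count (-1) = 0 then 1 else (2 : Int) ^ (L.count (-1) - 1))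
  else if p = -1 then (2 : Int) ^ (L.count 1) * (if L.count (-1) = 0 then 0 else (2 : Int) ^ (L.count (-1) - 1))
  else 0

theorem badSub_zero_of_ne (L : List Int) (p : Int) (h1 : p ≠ 1) (h2 : p ≠ -1) :
    badSub L p = 0 := by
  simp [badSub, h1, h2]

theorem pow_pred_two (m : Nat) (hm : m ≠ 0) : (2:Int) ^ (m-1) + (2:Int) ^ (m-1) = 2 ^ m := by
  calc (2:Int) ^ (m-1) + (2:Int) ^ (m-1) = 2 ^ (m-1) * 2 := by ring
    _ = 2 ^ (m-1+1) := (pow_succ 2 (m-1)).symm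
    _ = 2 ^ m := by rw [show m - 1 + 1 = m from by omega]

theorem badSub_cons (d : Int) (L : List Int) (p : Int) :
    badSub (d :: L) p = badSub L p + badSub L (p * d) := by
  by_cases hd1 : d = 1
  · subst hd1
    by_cases hp1 : p = 1
    · subst hp1; simp [badSub, pow_succ]; split_ifs <;> ring
    · by_cases hpm : p = -1
      · subst hpm; simp [badSub, pow_succ]; split_ifs <;> ring
      · rw [badSub_zero_of_ne _ _ hp1 hpm, badSub_zero_of_ne, mul_one,
            badSub_zero_of_ne _ _ hp1 hpm] <;> simp [hp1, hpm]
  · by_cases hdm : d = -1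
    · subst hdm
      by_cases hp1 : p = 1
      · subst hp1
        by_cases hm : L.count (-1) = 0 <;>
          simp [badSub, hm]
        rw [← pow_pred_two _ hm]; ring
      · by_cases hpm : p = -1
        · subst hpm
          by_cases hm : L.count (-1) = 0 <;>
            simp [badSub, hm]
          rw [← pow_pred_two _ hm]; ring
        · rw [badSub_zero_of_ne _ _ hp1 hpm, badSub_zero_of_ne, badSub_zero_of_ne] <;>
            simp [hp1, hpm] <;> omega
    · have hpd1 : p * d ≠ 1 := by
        intro h
        have hu : IsUnit d := IsUnit.of_mul_eq_one p (by rw [mul_comm]; exact h)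
        rcases Int.isUnit_iff.mp hu with h' | h' <;> [exact hd1 h'; exact hdm h']
      have hpdm : p * d ≠ -1 := by
        intro h
        have hu : IsUnit d := IsUnit.of_mul_eq_one (-p) (by rw [mul_comm]; linarith)
        rcases Int.isUnit_iff.mp hu with h' | h' <;> [exact hd1 h'; exact hdm h']
      rw [badSub_zero_of_ne _ _ hpd1 hpdm, add_zero]
      simp [badSub, hd1, hdm]

theorem foldl_mul_one_add (L : List Int) (p : Int) :
    L.foldl (fun acc d => acc * (1 + d)) p = p * L.foldl (fun acc d => acc * (1 + d)) 1 := by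
  induction L generalizing p with
  | nil => simp
  | cons d L ih =>
    simp only [List.foldl_cons]
    rw [ih (p * (1 + d)), ih (1 * (1 + d))]
    ring

theorem gSub_closed (L : List Int) (p : Int) :
    gSub L p = L.foldl (fun acc d => acc * (1 + d)) p - badSub L p := by
  induction L generalizing p with
  | nil =>
    by_cases hp : p = 1 <;> simp [gSub, badSub, hp]
  | cons d L ih =>
    simp only [gSub, List.foldl_cons, badSub_cons, ih]
    rw [foldl_mul_one_add L (p * (1 + d)), foldl_mul_one_add L p, foldl_mul_one_add L (p * d)]
    ring

theorem subsetsR_eq_gSub (divisors : List Int) (index product n : Int) :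
    subsetsR divisors index product n =
      gSub ((PySem.List.pyRange index (divisors.length : Int) 1).map
        (fun i => PySem.List.pyGetD divisors i 0)) product := by
  rw [subsetsR]
  by_cases h : (divisors.length : Int) ≤ index
  · rw [if_pos h, PySem.List.pyRange_one_eq_nil h]
    simp [gSub]
  · rw [if_neg h, PySem.List.pyRange_one_cons (by omega)]
    simp only [List.map_cons, gSub]
    rw [subsetsR_eq_gSub divisors (index + 1) product (n - 1),
        subsetsR_eq_gSub divisors (index + 1) (product * PySem.List.pyGetD divisors index 0) (n - 1)]
termination_by ((divisors.length : Int) - index).toNat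
decreasing_by all_goals (simp at *; omega)

-- ===== VERDICT (by name: the statement is the Claim_ definition above) =====
theorem subsetsR_spec : Claim_equal_subsetsR := by
  intro divisors index product n _ _
  show subsetsR divisors index product n = subsetsR_alt divisors index product n
  rw [subsetsR_eq_gSub, subsetsR_alt, gSub_closed]
  rfl
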